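-- pv_equiv track=rewrite | github.com/mnazzaro/Schedule-Maker-UMD | logic.py | general_track
-- ===== SOURCE A (Python) =====
-- import copy
--
-- def general_track(courses):
--     systems = ["CMSC411", "CMSC412", "CMSC414", "CMSC416", "CMSC417"]
--     info_processing = ["CMSC420", "CMSC421", "CMSC422", \
--                        "CMSC423", "CMSC424", "CMSC426", "CMSC427", "CMSC470"]
--     SE_PL = ["CMSC430", "CMSC433", "CMSC434", "CMSC435", "CMSC436"]
--     theory = ["CMSC451", "CMSC452", "CMSC456", "CMSC457"]
--     num_analysis = ["CMSC460", "CMSC466"]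
--     misc = ["CMSC320", "CMSC389N", "CMSC425", "CMSC454", "CMSC472"]
--     total_general_courses = systems + info_processing + \
--         SE_PL + theory + num_analysis
--
--     courses_new = copy.deepcopy(courses)
--     courses_new = list(map(lambda x: x.split(" ")[0], courses_new))
--     print (f"COURSES: {courses_new}")
--     index_list = [0, 0, 0, 0, 0]
--     for i in range(len(courses_new)-1, -1, -1):
--         c = courses_new[i]
--         if(c in total_general_courses):
--             if(c in systems):
--                 courses_new.remove(c)
--                 index_list[0] = index_list[0] + 1
--             elif(c in info_processing):
--                 courses_new.remove(c)
--                 index_list[1] = index_list[1] + 1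
--             elif(c in SE_PL):
--                 courses_new.remove(c)
--                 index_list[2] = index_list[2] + 1
--             elif(c in theory):
--                 courses_new.remove(c)
--                 index_list[3] = index_list[3] + 1
--             if(c in num_analysis):
--                 courses_new.remove(c)
--                 index_list[4] = index_list[4] + 1
--
--     print (f"INDEX LIST: {index_list}")
--     if(sum(index_list) < 5):
--         return False, "You don't meet the CMSC general track requirements! You need more Upper Level CS courses"
--
--     zero_count = 0
--     for i in index_list:
--         if(i == 0):
--             zero_count += 1
--
--     if(zero_count > 2 and sum(index_list) >= 5):
--         return False, "You don't meet the CMSC general track requirements! The Upper Level CS courses on your schedule don't span across 3 areas."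
--     misc_count = 0
--     for c in courses_new:
--         if(c in total_general_courses or (c in misc)):
--             misc_count += 1
--
--     if(misc_count >= 2):
--         return True, ""
--
--     return False, "You don't meet the CMSC general track requirements! You are missing the 2 required electives."
-- ===== SOURCE B (Python) =====
-- def general_track(courses):
--     systems = ["CMSC411", "CMSC412", "CMSC414", "CMSC416", "CMSC417"]
--     info_processing = ["CMSC420", "CMSC421", "CMSC422",
--                        "CMSC423", "CMSC424", "CMSC426", "CMSC427", "CMSC470"]
--     SE_PL = ["CMSC430", "CMSC433", "CMSC434", "CMSC435", "CMSC436"]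
--     theory = ["CMSC451", "CMSC452", "CMSC456", "CMSC457"]
--     num_analysis = ["CMSC460", "CMSC466"]
--     misc = ["CMSC320", "CMSC389N", "CMSC425", "CMSC454", "CMSC472"]
--
--     stripped = [c.split(" ")[0] for c in courses]
--     print(f"COURSES: {stripped}")
--
--     n_sys = n_info = n_sepl = n_theory = n_num = 0
--     for c in stripped:
--         if c in systems:
--             n_sys += 1
--         elif c in info_processing:
--             n_info += 1
--         elif c in SE_PL:
--             n_sepl += 1
--         elif c in theory:
--             n_theory += 1
--         elif c in num_analysis:
--             n_num += 1
--     counts = [n_sys, n_info, n_sepl, n_theory, n_num]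
--     print(f"INDEX LIST: {counts}")
--
--     if n_sys + n_info + n_sepl + n_theory + n_num < 5:
--         return False, "You don't meet the CMSC general track requirements! You need more Upper Level CS courses"
--
--     if counts.count(0) > 2:
--         return False, "You don't meet the CMSC general track requirements! The Upper Level CS courses on your schedule don't span across 3 areas."
--
--     if sum(1 for c in stripped if c in misc) >= 2:
--         return True, ""
--
--     return False, "You don't meet the CMSC general track requirements! You are missing the 2 required electives."
-- ===== Notes on version B (the rewrite author's own statement) =====
-- stated objective: simpler
-- what changed: Replaces A's backward index loop that mutates the course list with list.remove (deepcopy, shifting indices, re-reads after removal) by a single forward pass over the stripped courses incrementing five category counters, and counts the elective (misc) courses directly instead of scanning the mutated leftover list.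
import Mathlib
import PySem

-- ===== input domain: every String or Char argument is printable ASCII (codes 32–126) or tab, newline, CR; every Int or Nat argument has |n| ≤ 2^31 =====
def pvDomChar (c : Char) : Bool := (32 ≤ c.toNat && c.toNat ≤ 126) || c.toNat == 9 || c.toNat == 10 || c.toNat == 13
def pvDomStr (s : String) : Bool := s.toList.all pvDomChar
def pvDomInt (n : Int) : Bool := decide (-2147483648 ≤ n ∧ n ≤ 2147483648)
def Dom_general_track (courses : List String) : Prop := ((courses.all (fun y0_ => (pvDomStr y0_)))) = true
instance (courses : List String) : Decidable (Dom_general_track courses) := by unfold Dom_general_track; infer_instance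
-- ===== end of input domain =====

-- B replaces A's backward index loop with list.remove mutation by one forward counting pass; return value only
-- (both Pythons also print two identical diagnostic lines, not modelled here).

-- ===== PORT A =====
-- the course-category constants both Python versions spell out verbatim
def pvSystems : List String := ["CMSC411", "CMSC412", "CMSC414", "CMSC416", "CMSC417"]
def pvInfo : List String := ["CMSC420", "CMSC421", "CMSC422", "CMSC423", "CMSC424", "CMSC426", "CMSC427", "CMSC470"]
def pvSEPL : List String := ["CMSC430", "CMSC433", "CMSC434", "CMSC435", "CMSC436"]
def pvTheory : List String := ["CMSC451", "CMSC452", "CMSC456", "CMSC457"]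
def pvNum : List String := ["CMSC460", "CMSC466"]
def pvMisc : List String := ["CMSC320", "CMSC389N", "CMSC425", "CMSC454", "CMSC472"]
def pvTotal : List String := pvSystems ++ pvInfo ++ pvSEPL ++ pvTheory ++ pvNum
def pvMsg1 : String := "You don't meet the CMSC general track requirements! You need more Upper Level CS courses"
def pvMsg2 : String := "You don't meet the CMSC general track requirements! The Upper Level CS courses on your schedule don't span across 3 areas."
def pvMsg3 : String := "You don't meet the CMSC general track requirements! You are missing the 2 required electives."
-- x.split(" ")[0]; split with a nonempty separator never returns the empty list, so the [0] never raises
def pvStrip (x : String) : String := ((PySem.Str.split? x " ").getD []).headD ""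

-- A's loop 'for i in range(len(courses_new)-1, -1, -1)' with list.remove mutation; recursion on i+1
-- (index_list ported as the 5-tuple of its components). courses_new[i] is always in range in every
-- reachable call (each remove deletes an index ≤ the current one), so pyGetD's default is never used;
-- likewise remove? always finds c (c was just read from the list), so getD never fires.
def pvAGo : List String → Int × Int × Int × Int × Int → Nat → List String × (Int × Int × Int × Int × Int)
  | cs, il, 0 => (cs, il)
  | cs, il, k+1 =>
    let c := PySem.List.pyGetD cs (k : Int) ""
    let (i0, i1, i2, i3, i4) := il
    if pvTotal.contains c then
      let st1 : List String × (Int × Int × Int × Int × Int) :=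
        if pvSystems.contains c then ((PySem.List.remove? cs c).getD cs, (i0+1, i1, i2, i3, i4))
        else if pvInfo.contains c then ((PySem.List.remove? cs c).getD cs, (i0, i1+1, i2, i3, i4))
        else if pvSEPL.contains c then ((PySem.List.remove? cs c).getD cs, (i0, i1, i2+1, i3, i4))
        else if pvTheory.contains c then ((PySem.List.remove? cs c).getD cs, (i0, i1, i2, i3+1, i4))
        else (cs, (i0, i1, i2, i3, i4))
      let (cs1, il1) := st1
      let (j0, j1, j2, j3, j4) := il1
      if pvNum.contains c then pvAGo ((PySem.List.remove? cs1 c).getD cs1) (j0, j1, j2, j3, j4+1) k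
      else pvAGo cs1 il1 k
    else pvAGo cs il k

def general_track (courses : List String) : Bool × String :=
  let courses_new := courses.map pvStrip
  let res := pvAGo courses_new (0, 0, 0, 0, 0) courses_new.length
  let remaining := res.1
  let (i0, i1, i2, i3, i4) := res.2
  if i0 + i1 + i2 + i3 + i4 < 5 then (false, pvMsg1)
  else
    let zero_count : Int := [i0, i1, i2, i3, i4].foldl (fun z x => if x == 0 then z + 1 else z) 0
    if zero_count > 2 ∧ i0 + i1 + i2 + i3 + i4 ≥ 5 then (false, pvMsg2)
    else
      let misc_count : Int := remaining.foldl (fun n c => if pvTotal.contains c || pvMisc.contains c then n + 1 else n) 0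
      if misc_count ≥ 2 then (true, "") else (false, pvMsg3)

-- ===== PORT B =====
-- one forward pass classifying each stripped course by the first matching category
def pvBStep (acc : Int × Int × Int × Int × Int) (c : String) : Int × Int × Int × Int × Int :=
  let (a, b, s, t, n) := acc
  if pvSystems.contains c then (a+1, b, s, t, n)
  else if pvInfo.contains c then (a, b+1, s, t, n)
  else if pvSEPL.contains c then (a, b, s+1, t, n)
  else if pvTheory.contains c then (a, b, s, t+1, n)
  else if pvNum.contains c then (a, b, s, t, n+1)
  else acc

def general_track_alt (courses : List String) : Bool × String :=
  let stripped := courses.map pvStrip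
  let (n0, n1, n2, n3, n4) := stripped.foldl pvBStep (0, 0, 0, 0, 0)
  if n0 + n1 + n2 + n3 + n4 < 5 then (false, pvMsg1)
  else if ((PySem.List.count [n0, n1, n2, n3, n4] 0 : Nat) : Int) > 2 then (false, pvMsg2)
  -- sum(1 for c in stripped if c in misc) ported as countP
  else if ((stripped.countP (fun c => pvMisc.contains c) : Nat) : Int) ≥ 2 then (true, "")
  else (false, pvMsg3)

-- ===== PRECONDITION & SPEC =====
def Spec_general_track (courses : List String) (out : Bool × String) : Prop := out = general_track_alt courses
instance (courses : List String) (out : Bool × String) : Decidable (Spec_general_track courses out) := by unfold Spec_general_track; infer_instance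

-- ===== CLAIM (what is proved, stated in full; the proofs are below) =====
def Claim_equal_general_track : Prop := ∀ (courses : List String), Dom_general_track courses → Spec_general_track courses (general_track courses)

-- ===== LEMMAS AND PROOFS =====

-- integer count of category members in a list
def pvCnt (pl : List String) (l : List String) : Int := (l.countP (fun c => pl.contains c) : Int)

lemma pvTotal_contains (c : String) :
    pvTotal.contains c = (pvSystems.contains c || pvInfo.contains c || pvSEPL.contains c ||
      pvTheory.contains c || pvNum.contains c) := by
  simp [pvTotal, Bool.or_assoc]

-- the five categories (and misc) are pairwise disjoint concrete lists
lemma pv_disj_sys (c : String) (h : pvSystems.contains c = true) :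
    pvInfo.contains c = false ∧ pvSEPL.contains c = false ∧ pvTheory.contains c = false ∧
    pvNum.contains c = false := by
  simp only [pvSystems, List.contains_iff_exists_mem_beq, List.mem_cons] at h
  obtain ⟨a, ha, hb⟩ := h
  simp at hb
  subst hb
  rcases ha with rfl|rfl|rfl|rfl|rfl|h <;> first | decide | simp at h

lemma pv_disj_info (c : String) (h : pvInfo.contains c = true) :
    pvSEPL.contains c = false ∧ pvTheory.contains c = false ∧ pvNum.contains c = false := by
  simp only [pvInfo, List.contains_iff_exists_mem_beq, List.mem_cons] at h
  obtain ⟨a, ha, hb⟩ := h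
  simp at hb
  subst hb
  rcases ha with rfl|rfl|rfl|rfl|rfl|rfl|rfl|rfl|h <;> first | decide | simp at h

lemma pv_disj_sepl (c : String) (h : pvSEPL.contains c = true) :
    pvTheory.contains c = false ∧ pvNum.contains c = false := by
  simp only [pvSEPL, List.contains_iff_exists_mem_beq, List.mem_cons] at h
  obtain ⟨a, ha, hb⟩ := h
  simp at hb
  subst hb
  rcases ha with rfl|rfl|rfl|rfl|rfl|h <;> first | decide | simp at h

lemma pv_disj_theory (c : String) (h : pvTheory.contains c = true) :
    pvNum.contains c = false := by
  simp only [pvTheory, List.contains_iff_exists_mem_beq, List.mem_cons] at h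
  obtain ⟨a, ha, hb⟩ := h
  simp at hb
  subst hb
  rcases ha with rfl|rfl|rfl|rfl|h <;> first | decide | simp at h

lemma pv_disj_misc (c : String) (h : pvMisc.contains c = true) :
    pvTotal.contains c = false := by
  simp only [pvMisc, List.contains_iff_exists_mem_beq, List.mem_cons] at h
  obtain ⟨a, ha, hb⟩ := h
  simp at hb
  subst hb
  rcases ha with rfl|rfl|rfl|rfl|rfl|h <;> first | decide | simp at h

lemma pvCnt_cons (pl : List String) (x : String) (xs : List String) :
    pvCnt pl (x :: xs) = (if pl.contains x then 1 else 0) + pvCnt pl xs := by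
  simp [pvCnt, List.countP_cons]
  split_ifs <;> omega

-- A's loop from index k-1 down to 0: counts gain the category counts of the first k elements,
-- and the list becomes (up to permutation) the non-general part of the first k elements ++ the rest
lemma pvAGo_spec (k : Nat) : ∀ (cs : List String) (i0 i1 i2 i3 i4 : Int), k ≤ cs.length →
    (pvAGo cs (i0, i1, i2, i3, i4) k).2 =
      (i0 + pvCnt pvSystems (cs.take k), i1 + pvCnt pvInfo (cs.take k),
       i2 + pvCnt pvSEPL (cs.take k), i3 + pvCnt pvTheory (cs.take k),
       i4 + pvCnt pvNum (cs.take k)) ∧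
    (pvAGo cs (i0, i1, i2, i3, i4) k).1.Perm
      ((cs.take k).filter (fun c => !pvTotal.contains c) ++ cs.drop k) := by
  induction k with
  | zero => intro cs i0 i1 i2 i3 i4 _; simp [pvAGo, pvCnt]
  | succ k ih =>
    intro cs i0 i1 i2 i3 i4 h
    have hk : k < cs.length := h
    have hget : PySem.List.pyGetD cs (k : Int) "" = cs[k] := by
      simp [List.getD_eq_getElem?_getD, List.getElem?_eq_getElem hk]
    have hmem : cs[k] ∈ cs := List.getElem_mem hk
    have htake : cs.take (k+1) = cs.take k ++ [cs[k]] := by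
      rw [List.take_add_one, List.getElem?_eq_getElem hk]; rfl
    have hmemtake : cs[k] ∈ cs.take (k+1) := by rw [htake]; exact List.mem_append_right _ (List.mem_singleton_self _)
    have hdrop : cs.drop k = cs[k] :: cs.drop (k+1) := List.drop_eq_getElem_cons hk
    obtain ⟨c, hc⟩ : ∃ c, cs[k] = c := ⟨_, rfl⟩
    rw [hc] at hget hmem htake hmemtake hdrop
    have hremove : (PySem.List.remove? cs c).getD cs = cs.erase c := by
      rw [PySem.List.remove?_eq_some_erase cs c hmem]; rfl
    have herase : cs.erase c = (cs.take (k+1)).erase c ++ cs.drop (k+1) := by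
      conv_lhs => rw [← List.take_append_drop (k+1) cs]
      rw [List.erase_append_left _ hmemtake]
    have hlen_te : ((cs.take (k+1)).erase c).length = k := by
      rw [List.length_erase_of_mem hmemtake, List.length_take]; omega
    have htake' : (cs.erase c).take k = (cs.take (k+1)).erase c := by
      rw [herase, List.take_left' hlen_te]
    have hdrop' : (cs.erase c).drop k = cs.drop (k+1) := by
      rw [herase, List.drop_left' hlen_te]
    have hlen' : k ≤ (cs.erase c).length := by
      rw [herase, List.length_append, hlen_te]; omega
    have hperm : (cs.take (k+1)).Perm (c :: (cs.take (k+1)).erase c) :=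
      List.perm_cons_erase hmemtake
    have hcnt : ∀ pl : List String, pvCnt pl (cs.take (k+1)) =
        (if pl.contains c then 1 else 0) + pvCnt pl ((cs.take (k+1)).erase c) := by
      intro pl
      have := hperm.countP_eq (fun x => pl.contains x)
      simp only [pvCnt, this, List.countP_cons]
      split_ifs <;> omega
    by_cases hT : pvTotal.contains c = true
    · -- c is a general-track course: it is removed and one counter increments
      have hfil : ((cs.take (k+1)).filter (fun x => !pvTotal.contains x)).Perm
          (((cs.take (k+1)).erase c).filter (fun x => !pvTotal.contains x)) := by
        have hTm : c ∈ pvTotal := by simpa using hT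
        have := hperm.filter (fun x => !pvTotal.contains x)
        simpa [List.filter_cons, hTm] using this
      by_cases h0 : pvSystems.contains c = true
      · obtain ⟨d1, d2, d3, d4⟩ := pv_disj_sys c h0
        simp only [pvAGo, hget, hT, if_true, h0, d4, Bool.false_eq_true, if_false, hremove]
        obtain ⟨c1, c2⟩ := ih (cs.erase c) (i0+1) i1 i2 i3 i4 hlen'
        rw [htake'] at c1; rw [htake', hdrop'] at c2
        refine ⟨by rw [c1]; simp only [hcnt, h0, d1, d2, d3, d4, if_true, Bool.false_eq_true,
          if_false, Prod.mk.injEq]; refine ⟨by omega, by omega, by omega, by omega, by omega⟩, ?_⟩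
        exact c2.trans (List.Perm.append_right _ hfil.symm)
      · by_cases h1 : pvInfo.contains c = true
        · obtain ⟨d2, d3, d4⟩ := pv_disj_info c h1
          simp only [pvAGo, hget, hT, if_true, h0, h1, d4, Bool.false_eq_true, if_false, hremove]
          obtain ⟨c1, c2⟩ := ih (cs.erase c) i0 (i1+1) i2 i3 i4 hlen'
          rw [htake'] at c1; rw [htake', hdrop'] at c2
          refine ⟨by rw [c1]; simp only [hcnt, h0, h1, d2, d3, d4, if_true, Bool.false_eq_true,
            if_false, Prod.mk.injEq]; refine ⟨by omega, by omega, by omega, by omega, by omega⟩, ?_⟩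
          exact c2.trans (List.Perm.append_right _ hfil.symm)
        · by_cases h2 : pvSEPL.contains c = true
          · obtain ⟨d3, d4⟩ := pv_disj_sepl c h2
            simp only [pvAGo, hget, hT, if_true, h0, h1, h2, d4, Bool.false_eq_true, if_false, hremove]
            obtain ⟨c1, c2⟩ := ih (cs.erase c) i0 i1 (i2+1) i3 i4 hlen'
            rw [htake'] at c1; rw [htake', hdrop'] at c2
            refine ⟨by rw [c1]; simp only [hcnt, h0, h1, h2, d3, d4, if_true, Bool.false_eq_true,
              if_false, Prod.mk.injEq]; refine ⟨by omega, by omega, by omega, by omega, by omega⟩, ?_⟩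
            exact c2.trans (List.Perm.append_right _ hfil.symm)
          · by_cases h3 : pvTheory.contains c = true
            · have d4 := pv_disj_theory c h3
              simp only [pvAGo, hget, hT, if_true, h0, h1, h2, h3, d4, Bool.false_eq_true, if_false, hremove]
              obtain ⟨c1, c2⟩ := ih (cs.erase c) i0 i1 i2 (i3+1) i4 hlen'
              rw [htake'] at c1; rw [htake', hdrop'] at c2
              refine ⟨by rw [c1]; simp only [hcnt, h0, h1, h2, h3, d4, if_true, Bool.false_eq_true,
                if_false, Prod.mk.injEq]; refine ⟨by omega, by omega, by omega, by omega, by omega⟩, ?_⟩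
              exact c2.trans (List.Perm.append_right _ hfil.symm)
            · have h4 : pvNum.contains c = true := by
                rw [pvTotal_contains] at hT
                simp only [h0, h1, h2, h3, Bool.false_or] at hT
                exact hT
              simp only [pvAGo, hget, hT, if_true, h0, h1, h2, h3, h4, Bool.false_eq_true, if_false, hremove]
              obtain ⟨c1, c2⟩ := ih (cs.erase c) i0 i1 i2 i3 (i4+1) hlen'
              rw [htake'] at c1; rw [htake', hdrop'] at c2
              refine ⟨by rw [c1]; simp only [hcnt, h0, h1, h2, h3, h4, if_true, Bool.false_eq_true,
                if_false, Prod.mk.injEq]; refine ⟨by omega, by omega, by omega, by omega, by omega⟩, ?_⟩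
              exact c2.trans (List.Perm.append_right _ hfil.symm)
    · -- c is not a general-track course: nothing changes, the loop moves on
      have hT' : pvTotal.contains c = false := by revert hT; cases pvTotal.contains c <;> simp
      have hT2 := hT'
      rw [pvTotal_contains] at hT2
      simp only [Bool.or_eq_false_iff] at hT2
      obtain ⟨⟨⟨⟨e0, e1⟩, e2⟩, e3⟩, e4⟩ := hT2
      simp only [pvAGo, hget, hT', Bool.false_eq_true, if_false]
      obtain ⟨c1, c2⟩ := ih cs i0 i1 i2 i3 i4 (Nat.le_of_succ_le h)
      have hcnt' : ∀ pl : List String, pl.contains c = false →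
          pvCnt pl (cs.take (k+1)) = pvCnt pl (cs.take k) := by
        intro pl hpl
        have hpl' : c ∉ pl := by simpa using hpl
        rw [htake]
        simp [pvCnt, List.countP_append, List.countP_cons, hpl']
      refine ⟨by rw [c1, hcnt' _ e0, hcnt' _ e1, hcnt' _ e2, hcnt' _ e3, hcnt' _ e4], ?_⟩
      have hfil : (cs.take (k+1)).filter (fun x => !pvTotal.contains x) ++ cs.drop (k+1) =
          (cs.take k).filter (fun x => !pvTotal.contains x) ++ cs.drop k := by
        have hTm : c ∉ pvTotal := by simpa using hT'
        rw [htake, hdrop, List.filter_append]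
        simp [hTm]
      rw [hfil]
      exact c2

-- B's fold computes the five category counts
lemma pvBFold_spec (l : List String) : ∀ (a b s t n : Int),
    l.foldl pvBStep (a, b, s, t, n) =
      (a + pvCnt pvSystems l, b + pvCnt pvInfo l, s + pvCnt pvSEPL l,
       t + pvCnt pvTheory l, n + pvCnt pvNum l) := by
  induction l with
  | nil => intro a b s t n; simp [pvCnt]
  | cons x xs ih =>
    intro a b s t n
    simp only [List.foldl_cons, pvBStep]
    by_cases h0 : pvSystems.contains x = true
    · obtain ⟨d1, d2, d3, d4⟩ := pv_disj_sys x h0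
      simp only [h0, if_true, ih, pvCnt_cons, d1, d2, d3, d4, Prod.mk.injEq]
      refine ⟨?_, ?_, ?_, ?_, ?_⟩ <;> (try simp) <;> omega
    · by_cases h1 : pvInfo.contains x = true
      · obtain ⟨d2, d3, d4⟩ := pv_disj_info x h1
        simp only [h0, h1, if_true, ih, pvCnt_cons, d2, d3, d4, Prod.mk.injEq]
        refine ⟨?_, ?_, ?_, ?_, ?_⟩ <;> (try simp) <;> omega
      · by_cases h2 : pvSEPL.contains x = true
        · obtain ⟨d3, d4⟩ := pv_disj_sepl x h2
          simp only [h0, h1, h2, if_true, ih, pvCnt_cons, d3, d4, Prod.mk.injEq]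
          refine ⟨?_, ?_, ?_, ?_, ?_⟩ <;> (try simp) <;> omega
        · by_cases h3 : pvTheory.contains x = true
          · have d4 := pv_disj_theory x h3
            simp only [h0, h1, h2, h3, if_true, ih, pvCnt_cons, d4, Prod.mk.injEq]
            refine ⟨?_, ?_, ?_, ?_, ?_⟩ <;> (try simp) <;> omega
          · by_cases h4 : pvNum.contains x = true
            · simp only [h0, h1, h2, h3, h4, if_true, ih, pvCnt_cons, Prod.mk.injEq]
              refine ⟨?_, ?_, ?_, ?_, ?_⟩ <;> (try simp) <;> omega
            · simp only [h0, h1, h2, h3, h4, ih, pvCnt_cons, Prod.mk.injEq]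
              refine ⟨?_, ?_, ?_, ?_, ?_⟩ <;> (try simp) <;> omega

-- ===== VERDICT (by name: the statement is the Claim_ definition above) =====
theorem general_track_spec : Claim_equal_general_track := by
  intro courses _
  unfold Spec_general_track
  simp only [general_track, general_track_alt]
  obtain ⟨c1, c2⟩ := pvAGo_spec (courses.map pvStrip).length (courses.map pvStrip) 0 0 0 0 0 (le_refl _)
  rw [List.take_length] at c1
  rw [List.take_length, List.drop_length, List.append_nil] at c2
  simp only [c1, pvBFold_spec (courses.map pvStrip) 0 0 0 0 0]
  by_cases h1 : 0 + pvCnt pvSystems (courses.map pvStrip) + (0 + pvCnt pvInfo (courses.map pvStrip)) +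
      (0 + pvCnt pvSEPL (courses.map pvStrip)) + (0 + pvCnt pvTheory (courses.map pvStrip)) +
      (0 + pvCnt pvNum (courses.map pvStrip)) < 5
  · rw [if_pos h1, if_pos h1]
  · rw [if_neg h1, if_neg h1]
    rw [PySem.List.foldl_beq_add_one]
    rw [PySem.List.count_eq]
    by_cases h2 : ((List.count 0 [0 + pvCnt pvSystems (courses.map pvStrip), 0 + pvCnt pvInfo (courses.map pvStrip),
        0 + pvCnt pvSEPL (courses.map pvStrip), 0 + pvCnt pvTheory (courses.map pvStrip),
        0 + pvCnt pvNum (courses.map pvStrip)] : Nat) : Int) > 2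
    · rw [if_pos (by omega : (0:Int) + _ > 2 ∧ _), if_pos h2]
    · rw [if_neg (by omega : ¬((0:Int) + _ > 2 ∧ _)), if_neg h2]
      rw [PySem.List.foldl_count_if]
      have hcp : List.countP (fun c => pvTotal.contains c || pvMisc.contains c)
          (pvAGo (courses.map pvStrip) (0, 0, 0, 0, 0) (courses.map pvStrip).length).1 =
          List.countP (fun c => pvMisc.contains c) (courses.map pvStrip) := by
        rw [c2.countP_eq, List.countP_filter]
        refine List.countP_congr (fun a _ => ?_)
        cases hM : pvMisc.contains a with
        | true =>
          have hTf : a ∉ pvTotal := by simpa using pv_disj_misc a hM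
          simp [hTf]
        | false => cases hT : pvTotal.contains a <;> simp [hM, hT]
      rw [hcp, zero_add]
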